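-- pv_equiv track=rewrite | github.com/RicciZ/ECE365 | Genomics/Genomics_Lab1/main.py | check_impurity
-- ===== SOURCE A (Python) =====
-- def check_impurity(dna_reads) :
--     '''
--     Input - list of dna reads
--     Output - list of reads which have impurities, a set of impure chars
--     '''
--     #start code here
--     impure_reads = []
--     impure_char = set()
--     for i in dna_reads:
--         impure = 0
--         for j in i:
--             if j not in "ACGTacgt":
--                 impure_char.add(j)
--                 impure = 1
--         if impure:
--             impure_reads.append(i)
--     return impure_reads,impure_char
-- ===== SOURCE B (Python) =====
-- def check_impurity(dna_reads):
--     '''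
--     Input - list of dna reads
--     Output - list of reads which have impurities, a set of impure chars
--     '''
--     allowed = set("ACGTacgt")
--     impure_reads = [r for r in dna_reads if any(c not in allowed for c in r)]
--     impure_char = set("".join(impure_reads)) - allowed
--     return impure_reads, impure_char
-- ===== Notes on version B (the rewrite author's own statement) =====
-- stated objective: simpler
-- what changed: Two staged passes instead of A's single pass with a per-read impure flag: first a filter comprehension selects the impure reads, then the impure-char set is derived in one step as set of the concatenation of those selected reads minus the allowed alphabet (correct because every impure char occurs only inside an impure read).
import Mathlib
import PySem

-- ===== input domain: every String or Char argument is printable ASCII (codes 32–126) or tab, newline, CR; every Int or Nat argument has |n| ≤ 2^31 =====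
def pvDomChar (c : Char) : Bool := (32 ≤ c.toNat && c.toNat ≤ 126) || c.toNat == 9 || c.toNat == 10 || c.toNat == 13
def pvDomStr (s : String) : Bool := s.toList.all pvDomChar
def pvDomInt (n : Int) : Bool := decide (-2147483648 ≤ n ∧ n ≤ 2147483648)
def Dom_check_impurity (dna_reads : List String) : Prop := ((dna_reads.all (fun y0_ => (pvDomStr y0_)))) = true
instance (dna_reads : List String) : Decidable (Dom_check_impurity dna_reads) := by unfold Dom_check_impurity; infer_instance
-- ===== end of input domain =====

-- B replaces A's single pass (per-read char loop with an `impure` flag, accumulating both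
-- results at once) by two staged passes: a filter comprehension selecting the impure reads,
-- then the impure-char set derived in one step as set("".join(impure_reads)) - allowed
-- (objective: simpler). In both ports Python's one-char strings are handled as Char during
-- the computation and converted to one-char strings only at the return (exact: 1-char str ↔ Char).

-- ===== PORT A =====
-- the pure alphabet "ACGTacgt" as chars
def pvPure : List Char := "ACGTacgt".toList

def check_impurity (dna_reads : List String) : List String × List String :=
  let st := dna_reads.foldl
    (fun (acc : List String × PySem.Set Char) i =>
      -- impure = 0; for j in i: if j not in "ACGTacgt": impure_char.add(j); impure = 1
      let inner := i.toList.foldl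
        (fun (p : PySem.Set Char × Int) j =>
          if pvPure.contains j then p else (PySem.Set.add p.1 j, 1))
        (acc.2, (0 : Int))
      -- if impure: impure_reads.append(i)
      (if inner.2 ≠ 0 then acc.1 ++ [i] else acc.1, inner.1))
    ([], PySem.Set.empty)
  (st.1, st.2.map (fun c => String.ofList [c]))

-- ===== PORT B =====
def check_impurity_alt (dna_reads : List String) : List String × List String :=
  -- allowed = set("ACGTacgt")
  let allowed : PySem.Set Char := PySem.Set.ofList "ACGTacgt".toList
  -- impure_reads = [r for r in dna_reads if any(c not in allowed for c in r)]
  let impure_reads := dna_reads.filter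
    (fun r => r.toList.any (fun c => !(PySem.Set.contains allowed c)))
  -- impure_char = set("".join(impure_reads)) - allowed
  let impure_char :=
    PySem.Set.diff (PySem.Set.ofList (PySem.Str.join "" impure_reads).toList) allowed
  (impure_reads, impure_char.map (fun c => String.ofList [c]))

-- ===== PRECONDITION & SPEC =====
def Spec_check_impurity (dna_reads : List String) (out : List String × List String) : Prop := out = check_impurity_alt dna_reads
instance (dna_reads : List String) (out : List String × List String) : Decidable (Spec_check_impurity dna_reads out) := by unfold Spec_check_impurity; infer_instance

-- ===== CLAIM (what is proved, stated in full; the proofs are below) =====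
def Claim_equal_check_impurity : Prop := ∀ (dna_reads : List String), Dom_check_impurity dna_reads → Spec_check_impurity dna_reads (check_impurity dna_reads)

-- ===== LEMMAS AND PROOFS =====

-- a char is bad (impure) iff it is not in the pure alphabet
def pvBad (c : Char) : Bool := !(pvPure.contains c)

-- "ACGTacgt" has no duplicate chars, so set("ACGTacgt") is the char list itself
theorem pure_ofList : PySem.Set.ofList "ACGTacgt".toList = pvPure := by decide

-- "".join over char lists is concatenation
theorem join_empty_flatten (l : List (List Char)) : PySem.Chars.join [] l = l.flatten := by
  induction l with
  | nil => rfl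
  | cons a l ih =>
    cases l with
    | nil => simp [PySem.Chars.join, List.intercalate]
    | cons b l => rw [PySem.Chars.join_cons_cons]; simp_all

-- dedup-then-filter equals filter-then-dedup
theorem ofList_filter (q : Char → Bool) (xs : List Char) :
    (PySem.Set.ofList xs).filter q = PySem.Set.ofList (xs.filter q) := by
  induction xs using List.reverseRecOn with
  | nil => rfl
  | append_singleton xs x ih =>
    rw [PySem.Set.ofList_append_singleton, List.filter_append, PySem.Set.add_eq_ite]
    by_cases hq : q x
    · rw [show List.filter q [x] = [x] by simp [hq],
        PySem.Set.ofList_append_singleton, PySem.Set.add_eq_ite]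
      by_cases hx : x ∈ PySem.Set.ofList xs
      · have hx' : x ∈ PySem.Set.ofList (xs.filter q) := by
          rw [PySem.Set.mem_ofList] at hx ⊢
          exact List.mem_filter.mpr ⟨hx, hq⟩
        rw [if_pos hx, if_pos hx', ih]
      · have hx' : x ∉ PySem.Set.ofList (xs.filter q) := by
          rw [PySem.Set.mem_ofList] at hx ⊢
          exact fun h => hx (List.mem_filter.mp h).1
        rw [if_neg hx, if_neg hx', List.filter_append, ih]
        simp [hq]
    · rw [show List.filter q [x] = [] by simp [hq], List.append_nil]
      by_cases hx : x ∈ PySem.Set.ofList xs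
      · rw [if_pos hx, ih]
      · rw [if_neg hx, List.filter_append, ih]
        simp [hq]

-- A's inner loop over the chars of one read, started at set s and flag f:
-- the set becomes s updated with the bad chars, the flag becomes 1 iff some char is bad
theorem inner_eq (cs : List Char) (s : PySem.Set Char) (f : Int) :
    cs.foldl
      (fun (p : PySem.Set Char × Int) j =>
        if pvPure.contains j then p else (PySem.Set.add p.1 j, 1))
      (s, f)
    = (PySem.Set.update s (cs.filter pvBad),
       if cs.any pvBad then 1 else f) := by
  induction cs generalizing s f with
  | nil => rfl
  | cons c cs ih =>
    rw [List.foldl_cons]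
    by_cases h : pvPure.contains c
    · have hm : c ∈ pvPure := by simpa using h
      have hb : pvBad c = false := by simp [pvBad, hm]
      rw [if_pos h, ih]
      simp [List.any_cons, hb]
    · have hm : c ∉ pvPure := by simpa using h
      have hb : pvBad c = true := by simp [pvBad, hm]
      rw [if_neg h, ih, List.filter_cons, List.any_cons, hb]
      refine Prod.ext ?_ ?_
      · rw [if_pos rfl, PySem.Set.update_cons]
      · simp

-- A's outer loop: the reads with a bad char are appended in order, the set is updated
-- with the bad chars of every read in order
theorem outer_eq (reads : List String) (l : List String) (s : PySem.Set Char) :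
    reads.foldl
      (fun (acc : List String × PySem.Set Char) i =>
        let inner := i.toList.foldl
          (fun (p : PySem.Set Char × Int) j =>
            if pvPure.contains j then p else (PySem.Set.add p.1 j, 1))
          (acc.2, (0 : Int))
        (if inner.2 ≠ 0 then acc.1 ++ [i] else acc.1, inner.1)) (l, s)
    = (l ++ reads.filter (fun r => r.toList.any pvBad),
       PySem.Set.update s (reads.flatMap (fun r => r.toList.filter pvBad))) := by
  induction reads generalizing l s with
  | nil => simp
  | cons r reads ih =>
    simp only [List.foldl_cons, List.filter_cons, List.flatMap_cons]
    rw [inner_eq]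
    by_cases hr : r.toList.any pvBad
    · simp only [hr, if_true, show (1 : Int) ≠ 0 by decide, ne_eq, not_false_eq_true, if_true]
      rw [ih, PySem.Set.update_append]
      simp
    · have hnil : r.toList.filter pvBad = [] := by
        rw [List.filter_eq_nil_iff]
        intro c hc
        have hall : ∀ x ∈ r.toList, ¬ pvBad x = true := by
          simpa [List.any_eq_true] using hr
        exact hall c hc
      simp only [hr, ne_eq, hnil]
      rw [ih]
      simp [PySem.Set.update]

-- pure reads contribute no bad chars: restricting the concatenation to the impure reads
-- does not change its bad chars
theorem flatMap_bad_filter (reads : List String) :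
    reads.flatMap (fun r => r.toList.filter pvBad)
    = (reads.filter (fun r => r.toList.any pvBad)).flatMap (fun r => r.toList.filter pvBad) := by
  induction reads with
  | nil => rfl
  | cons r reads ih =>
    simp only [List.flatMap_cons, List.filter_cons]
    by_cases hr : r.toList.any pvBad
    · rw [if_pos hr, List.flatMap_cons, ih]
    · have hnil : r.toList.filter pvBad = [] := by
        rw [List.filter_eq_nil_iff]
        intro c hc
        have hall : ∀ x ∈ r.toList, ¬ pvBad x = true := by
          simpa [List.any_eq_true] using hr
        exact hall c hc
      rw [if_neg hr, hnil, List.nil_append, ih]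

-- B's membership predicate is pvBad
theorem alt_pred_eq :
    (fun r : String => r.toList.any (fun c => !(PySem.Set.contains (PySem.Set.ofList "ACGTacgt".toList) c)))
    = (fun r : String => r.toList.any pvBad) := by
  have hc : (fun c : Char => !(PySem.Set.contains (PySem.Set.ofList "ACGTacgt".toList) c)) = pvBad := by
    funext c
    rw [pure_ofList]
    simp [pvBad, PySem.Set.contains_eq_listContains]
  funext r
  rw [hc]

-- filtering a concatenation = concatenating the filtered pieces
theorem filter_flatten_map (reads : List String) :
    ((reads.map String.toList).flatten).filter pvBad
    = reads.flatMap (fun r => r.toList.filter pvBad) := by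
  induction reads with
  | nil => rfl
  | cons r reads ih => simp [List.filter_append, ih]

-- ===== VERDICT (by name: the statement is the Claim_ definition above) =====
theorem check_impurity_spec : Claim_equal_check_impurity := by
  intro dna_reads _
  show check_impurity dna_reads = check_impurity_alt dna_reads
  unfold check_impurity check_impurity_alt
  simp only [outer_eq, alt_pred_eq, List.nil_append]
  refine Prod.ext rfl ?_
  show List.map _ _ = List.map _ _
  congr 1
  rw [pure_ofList]
  have hdiff : ∀ (t : PySem.Set Char),
      PySem.Set.diff t pvPure = t.filter (fun c => !(PySem.Set.contains pvPure c)) :=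
    fun _ => rfl
  rw [hdiff]
  have hc : (fun c : Char => !(PySem.Set.contains pvPure c)) = pvBad := by
    funext c
    simp [pvBad, PySem.Set.contains_eq_listContains]
  rw [hc, ofList_filter]
  have hempty : PySem.Set.update PySem.Set.empty (dna_reads.flatMap (fun r => r.toList.filter pvBad))
      = PySem.Set.ofList (dna_reads.flatMap (fun r => r.toList.filter pvBad)) := rfl
  rw [hempty]
  congr 1
  rw [show (PySem.Str.join "" (dna_reads.filter (fun r => r.toList.any pvBad))).toList
        = PySem.Chars.join [] ((dna_reads.filter (fun r => r.toList.any pvBad)).map String.toList)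
      from by simp [pysem]]
  rw [join_empty_flatten, filter_flatten_map, ← flatMap_bad_filter]
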